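-- pv_equiv track=rewrite | github.com/vishnuchakr/196-Homeworks | hw7.py | almost_product
-- ===== SOURCE A (Python) =====
-- def almost_product(arr):
--     toReturn = []
--     for i in range(0, len(arr)):
--         toAppend = 1
--         for j in range(0, len(arr)):
--             if arr[j] != arr[i]:
--                 toAppend *= arr[j]
--         toReturn.append(toAppend)
--     return toReturn
-- ===== SOURCE B (Python) =====
-- def almost_product(arr):
--     # Count each value once, take one product-per-distinct-value (v ** count),
--     # then prefix/suffix products over the distinct values give, for each value,
--     # the product of all elements with a different value, in O(n) multiplications.
--     counts = {}
--     for x in arr: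
--         counts[x] = counts.get(x, 0) + 1
--     items = list(counts.items())
--     g = [v ** c for v, c in items]
--     pref = []
--     p = 1
--     for x in g:
--         pref.append(p)
--         p *= x
--     res = {}
--     s = 1
--     for (v, _c), pr, gv in zip(reversed(items), reversed(pref), reversed(g)):
--         res[v] = pr * s
--         s *= gv
--     return [res[x] for x in arr]
-- ===== Notes on version B (the rewrite author's own statement) =====
-- stated objective: faster
-- what changed: Replaces the quadratic per-element rescan by one counting pass, one power per distinct value, and prefix/suffix products over the distinct values, then a dict lookup per element.
import Mathlib
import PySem

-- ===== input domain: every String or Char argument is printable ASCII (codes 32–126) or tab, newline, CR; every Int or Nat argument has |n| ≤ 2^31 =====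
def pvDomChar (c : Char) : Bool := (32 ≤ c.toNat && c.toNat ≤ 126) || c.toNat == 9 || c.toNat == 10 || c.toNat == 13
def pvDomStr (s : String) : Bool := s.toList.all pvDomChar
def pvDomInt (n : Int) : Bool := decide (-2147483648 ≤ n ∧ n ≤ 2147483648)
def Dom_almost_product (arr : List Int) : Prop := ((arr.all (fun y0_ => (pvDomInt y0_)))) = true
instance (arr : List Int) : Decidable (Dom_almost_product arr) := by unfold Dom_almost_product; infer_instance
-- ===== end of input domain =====

-- B replaces A's quadratic per-element rescan by counting, one power per distinct value,
-- and prefix/suffix products over the distinct values (objective: faster).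


-- ===== PORT A =====
def almost_product (arr : List Int) : List Int :=
  (PySem.List.pyRange 0 (PySem.List.len arr) 1).foldl (fun toReturn i =>
    let toAppend := (PySem.List.pyRange 0 (PySem.List.len arr) 1).foldl (fun t j =>
      if PySem.List.pyGetD arr j 0 ≠ PySem.List.pyGetD arr i 0
      then t * PySem.List.pyGetD arr j 0 else t) 1
    toReturn ++ [toAppend]) []

-- ===== PORT B =====
def almost_product_alt (arr : List Int) : List Int :=
  let counts : PySem.Dict Int Int :=
    arr.foldl (fun d x => d.insert x (d.getD x 0 + 1)) PySem.Dict.empty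
  let items := counts.items
  -- v ** c : every count c is a nonnegative int, so Python's ** is ^ on the Nat c.toNat
  let g := items.map (fun p => p.1 ^ p.2.toNat)
  let pref := (g.foldl (fun (st : List Int × Int) x => (st.1 ++ [st.2], st.2 * x)) ([], 1)).1
  let res := ((items.reverse.zip (pref.reverse.zip g.reverse)).foldl
      (fun (st : PySem.Dict Int Int × Int) t =>
        (st.1.insert t.1.1 (t.2.1 * st.2), st.2 * t.2.2)) (PySem.Dict.empty, 1)).1
  -- res[x]: every element of arr is a key of res, so Python's res[x] never raises
  arr.map (fun x => res.getD x 0)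

-- ===== PRECONDITION & SPEC =====
def Spec_almost_product (arr : List Int) (out : List Int) : Prop := out = almost_product_alt arr
instance (arr : List Int) (out : List Int) : Decidable (Spec_almost_product arr out) := by unfold Spec_almost_product; infer_instance

-- ===== CLAIM (what is proved, stated in full; the proofs are below) =====
def Claim_equal_almost_product : Prop := ∀ (arr : List Int), Dom_almost_product arr → Spec_almost_product arr (almost_product arr)

-- ===== LEMMAS AND PROOFS =====

-- the common value: product of the elements of arr whose value differs from v
def pvExcl (arr : List Int) (v : Int) : Int := (arr.filter (fun x => x ≠ v)).prod

-- the per-distinct-value group product v ^ (count of v in arr)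
def pvGf (arr : List Int) (w : Int) : Int := w ^ arr.count w

-- A's inner loop is a conditional product
theorem pvA_inner (arr : List Int) (v : Int) (a : Int) :
    arr.foldl (fun t x => if x ≠ v then t * x else t) a = a * pvExcl arr v := by
  induction arr generalizing a with
  | nil => simp [pvExcl]
  | cons y ys ih =>
      simp only [List.foldl_cons]
      rw [ih]
      split_ifs with h <;> simp [pvExcl, h, mul_assoc]

-- A computes the map of pvExcl
theorem pvA_eq (arr : List Int) : almost_product arr = arr.map (fun v => pvExcl arr v) := by
  unfold almost_product
  have h1 : ∀ i : Int, (PySem.List.pyRange 0 (PySem.List.len arr) 1).foldl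
      (fun t j => if PySem.List.pyGetD arr j 0 ≠ PySem.List.pyGetD arr i 0
        then t * PySem.List.pyGetD arr j 0 else t) 1
      = pvExcl arr (PySem.List.pyGetD arr i 0) := by
    intro i
    rw [PySem.List.foldl_pyRange_zero_pyGetD arr 0
      (fun t x => if x ≠ PySem.List.pyGetD arr i 0 then t * x else t) 1]
    rw [pvA_inner]; ring
  simp only [h1]
  rw [PySem.List.foldl_append_singleton_eq_map
    (fun i => pvExcl arr (PySem.List.pyGetD arr i 0)), List.nil_append]
  have h2 : (fun i => pvExcl arr (PySem.List.pyGetD arr i 0))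
      = (fun v => pvExcl arr v) ∘ (fun j => PySem.List.pyGetD arr j 0) := rfl
  rw [h2, ← List.map_map, PySem.List.map_pyGetD_pyRange_zero]

-- prefix-products helper (proof-side characterisation of B's first loop)
def pvPref (p : Int) : List Int → List Int
  | [] => []
  | x :: xs => p :: pvPref (p * x) xs

theorem pvPref_foldl (l : List Int) (acc : List Int) (p : Int) :
    (l.foldl (fun (st : List Int × Int) x => (st.1 ++ [st.2], st.2 * x)) (acc, p)).1
      = acc ++ pvPref p l := by
  induction l generalizing acc p with
  | nil => simp [pvPref]
  | cons x xs ih => simp [pvPref, ih]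

theorem pvPref_append (p : Int) (l1 l2 : List Int) :
    pvPref p (l1 ++ l2) = pvPref p l1 ++ pvPref (p * l1.prod) l2 := by
  induction l1 generalizing p with
  | nil => simp [pvPref]
  | cons x xs ih => simp [pvPref, ih, mul_assoc]

theorem pvPref_length (p : Int) (l : List Int) : (pvPref p l).length = l.length := by
  induction l generalizing p with
  | nil => rfl
  | cons x xs ih => simp [pvPref, ih]

-- B's second loop: keys not occurring keep their binding
theorem pvFold_skip (ts : List ((Int × Int) × Int × Int)) (v : Int)
    (hv : v ∉ ts.map (fun t => t.1.1)) (d0 : PySem.Dict Int Int) (s0 : Int) :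
    ((ts.foldl (fun (st : PySem.Dict Int Int × Int) t =>
        (st.1.insert t.1.1 (t.2.1 * st.2), st.2 * t.2.2)) (d0, s0)).1).getD v 0
      = d0.getD v 0 := by
  induction ts generalizing d0 s0 with
  | nil => rfl
  | cons t ts ih =>
      simp only [List.map_cons, List.mem_cons, not_or] at hv
      simp only [List.foldl_cons]
      rw [ih hv.2, PySem.Dict.getD_insert_of_ne _ _ _ hv.1]

theorem pvFold_hit (t1 t2 : List ((Int × Int) × Int × Int)) (t : (Int × Int) × Int × Int)
    (hv : t.1.1 ∉ t2.map (fun u => u.1.1)) (d0 : PySem.Dict Int Int) (s0 : Int) :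
    (((t1 ++ t :: t2).foldl (fun (st : PySem.Dict Int Int × Int) u =>
        (st.1.insert u.1.1 (u.2.1 * st.2), st.2 * u.2.2)) (d0, s0)).1).getD t.1.1 0
      = t.2.1 * (s0 * (t1.map (fun u => u.2.2)).prod) := by
  induction t1 generalizing d0 s0 with
  | nil =>
      simp only [List.nil_append, List.foldl_cons]
      rw [pvFold_skip t2 t.1.1 hv, PySem.Dict.getD_insert_self]
      simp
  | cons u us ih =>
      simp only [List.cons_append, List.foldl_cons]
      rw [ih, List.map_cons, List.prod_cons]
      ring

-- the core counting identity: product over distinct values ≠ v of their group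
-- products equals the product of the elements of arr that differ from v
theorem pvCore (arr : List Int) (v : Int) :
    (((PySem.Set.ofList arr).filter (fun w => w ≠ v)).map (pvGf arr)).prod
      = pvExcl arr v := by
  have he : ((PySem.Set.ofList arr).filter (fun w => decide (w ≠ v))).Nodup :=
    (PySem.Set.nodup_ofList arr).filter _
  rw [← List.prod_toFinset (pvGf arr) he]
  unfold pvExcl
  rw [Finset.prod_list_count (arr.filter (fun x => decide (x ≠ v)))]
  apply Finset.prod_congr
  · ext m
    simp [PySem.Set.mem_ofList]
  · intro m hm
    simp only [List.mem_toFinset, List.mem_filter] at hm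
    rw [List.count_filter (p := fun x => decide (x ≠ v)) (a := m) (l := arr) hm.2]
    rfl

-- reversing an append-cons decomposition
theorem pvRevAC {α : Type} (l1 l2 : List α) (a : α) :
    (l1 ++ a :: l2).reverse = l2.reverse ++ a :: l1.reverse := by
  simp

-- B computes the map of pvExcl
theorem pvB_eq (arr : List Int) : almost_product_alt arr = arr.map (fun v => pvExcl arr v) := by
  simp only [almost_product_alt, PySem.Dict.foldl_insert_getD_add_one_eq_counter,
    PySem.Dict.items_counter, List.map_map]
  rw [pvPref_foldl _ [] 1, List.nil_append]
  rw [show ((fun (p : Int × Int) => p.1 ^ p.2.toNat) ∘ fun k => (k, (List.count k arr : Int)))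
      = pvGf arr from funext fun k => by simp [pvGf]]
  apply List.map_congr_left
  intro x hx
  have hxd : x ∈ PySem.Set.ofList arr := (PySem.Set.mem_ofList arr x).mpr hx
  obtain ⟨d1, d2, hd⟩ := List.append_of_mem hxd
  have hnd := PySem.Set.nodup_ofList arr
  rw [hd] at hnd
  obtain ⟨hnd1, hnd2, hdisj⟩ := List.nodup_append.mp hnd
  have hx1 : x ∉ d1 := fun h => hdisj x h x List.mem_cons_self rfl
  have hx2 : x ∉ d2 := (List.nodup_cons.mp hnd2).1
  rw [hd]
  simp only [List.map_append, List.map_cons]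
  rw [pvPref_append]
  simp only [pvPref]
  rw [pvRevAC, pvRevAC, pvRevAC]
  rw [List.zip_append (by simp [pvPref_length]), List.zip_cons_cons]
  rw [List.zip_append (by simp [pvPref_length]), List.zip_cons_cons]
  rw [pvFold_hit _ _ _ (by
    rw [show (fun (u : (Int × Int) × Int × Int) => u.1.1) = Prod.fst ∘ Prod.fst from rfl,
      ← List.map_map, List.map_fst_zip (by simp [pvPref_length]), List.map_reverse,
      List.map_map]
    simp
    exact hx1)]
  rw [show (fun (u : (Int × Int) × Int × Int) => u.2.2) = Prod.snd ∘ Prod.snd from rfl,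
    ← List.map_map, List.map_snd_zip (by simp [pvPref_length]),
    List.map_snd_zip (by simp [pvPref_length]), List.prod_reverse]
  have hc := pvCore arr x
  have f1 : List.filter (fun w => !decide (w = x)) d1 = d1 :=
    List.filter_eq_self.mpr (fun a ha => by simp; rintro rfl; exact hx1 ha)
  have f2 : List.filter (fun w => !decide (w = x)) d2 = d2 :=
    List.filter_eq_self.mpr (fun a ha => by simp; rintro rfl; exact hx2 ha)
  rw [hd, List.filter_append, List.filter_cons] at hc
  simp only [ne_eq, decide_not, f1, f2] at hc
  rw [if_neg (by simp)] at hc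
  rw [List.map_append, List.prod_append] at hc
  simp only [one_mul]
  exact hc

-- ===== VERDICT (by name: the statement is the Claim_ definition above) =====
theorem almost_product_spec : Claim_equal_almost_product := by
  intro arr _
  unfold Spec_almost_product
  rw [pvA_eq, pvB_eq]
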